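-- pv_equiv track=rewrite | github.com/lgelderloos/curiosity | train.py | no_of_objs
-- ===== SOURCE A (Python) =====
-- def no_of_objs(data_dict, data_split):
--     """
--     Returns a dictionary with the
--     number of objects per image
--     for a train/validation/test
--     split of the data
--     """
--
--     no_of_objs = {}
--
--     for file in data_split:
--         if len(data_dict[file]) not in no_of_objs:
--             no_of_objs[len(data_dict[file])] = []
--             no_of_objs[len(data_dict[file])].append(file)
--         else:
--             no_of_objs[len(data_dict[file])].append(file)
--
--     return no_of_objs
-- ===== SOURCE B (Python) =====
-- def no_of_objs(data_dict, data_split):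
--     """
--     Returns a dictionary with the
--     number of objects per image
--     for a train/validation/test
--     split of the data
--     """
--     counts = list(dict.fromkeys(len(data_dict[f]) for f in data_split))
--     return {c: [f for f in data_split if len(data_dict[f]) == c] for c in counts}
-- ===== Notes on version B (the rewrite author's own statement) =====
-- stated objective: alternative
-- what changed: A accumulates groups by looking up and appending into a dict per file; B first computes the distinct object counts in order of first appearance (dict.fromkeys) and then builds each group with one filtering comprehension per count.
import Mathlib
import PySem

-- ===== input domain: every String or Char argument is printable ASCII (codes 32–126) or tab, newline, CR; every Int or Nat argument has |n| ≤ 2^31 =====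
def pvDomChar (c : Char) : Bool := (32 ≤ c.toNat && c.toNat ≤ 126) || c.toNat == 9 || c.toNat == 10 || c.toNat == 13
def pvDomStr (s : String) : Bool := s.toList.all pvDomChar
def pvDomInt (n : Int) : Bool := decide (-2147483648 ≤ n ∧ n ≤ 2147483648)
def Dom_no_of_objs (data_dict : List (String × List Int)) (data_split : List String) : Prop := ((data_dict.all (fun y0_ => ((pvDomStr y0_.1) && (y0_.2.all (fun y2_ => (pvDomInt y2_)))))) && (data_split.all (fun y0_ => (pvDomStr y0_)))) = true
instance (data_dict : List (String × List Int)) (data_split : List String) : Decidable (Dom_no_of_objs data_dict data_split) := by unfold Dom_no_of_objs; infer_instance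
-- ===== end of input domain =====

-- B replaces A's dict-accumulation loop by dedup-the-counts then one filter per count; same result, alternative structure.

-- ===== PORT A =====
-- len(data_dict[file]) as an Int; inside Pre_ the key is present, so getD [] is exact.
def pvKeyLen (data_dict : List (String × List Int)) (file : String) : Int :=
  (((PySem.Dict.mk data_dict).get? file).getD []).length

def no_of_objs (data_dict : List (String × List Int)) (data_split : List String) : List (Int × List String) :=
  (data_split.foldl (fun d file =>
      let k : Int := pvKeyLen data_dict file
      if d.contains k = false then
        let d1 := d.insert k ([] : List String)
        d1.modify k [] (fun l => l ++ [file])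
      else
        d.modify k [] (fun l => l ++ [file]))
    PySem.Dict.empty).items

-- ===== PORT B =====
def no_of_objs_alt (data_dict : List (String × List Int)) (data_split : List String) : List (Int × List String) :=
  let counts := PySem.List.dedup (data_split.map (pvKeyLen data_dict))
  counts.map (fun c => (c, data_split.filter (fun f => pvKeyLen data_dict f == c)))

-- ===== PRECONDITION & SPEC =====
-- Pre_ excludes exactly the inputs where a file of data_split is missing from data_dict (Python KeyError).
def Pre_no_of_objs (data_dict : List (String × List Int)) (data_split : List String) : Prop :=
  ∀ f ∈ data_split, (PySem.Dict.mk data_dict).contains f = true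
instance (data_dict : List (String × List Int)) (data_split : List String) : Decidable (Pre_no_of_objs data_dict data_split) := by unfold Pre_no_of_objs; infer_instance

def pvWitness_no_of_objs : (List (String × List Int)) × List String :=
  ([("a", [1, 2]), ("b", [3]), ("c", [4, 5])], ["a", "b", "c", "b"])

def Spec_no_of_objs (data_dict : List (String × List Int)) (data_split : List String) (out : List (Int × List String)) : Prop := out = no_of_objs_alt data_dict data_split
instance (data_dict : List (String × List Int)) (data_split : List String) (out : List (Int × List String)) : Decidable (Spec_no_of_objs data_dict data_split out) := by unfold Spec_no_of_objs; infer_instance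

-- ===== CLAIM (what is proved, stated in full; the proofs are below) =====
def Claim_equal_no_of_objs : Prop := ∀ (data_dict : List (String × List Int)) (data_split : List String), Dom_no_of_objs data_dict data_split → Pre_no_of_objs data_dict data_split → Spec_no_of_objs data_dict data_split (no_of_objs data_dict data_split)

-- ===== LEMMAS AND PROOFS =====

-- A's loop body (both branches) is a single modify.
theorem pv_step_eq (d : PySem.Dict Int (List String)) (k : Int) (file : String) :
    (if d.contains k = false then
       (d.insert k ([] : List String)).modify k [] (fun l => l ++ [file])
     else d.modify k [] (fun l => l ++ [file]))
    = d.modify k [] (fun l => l ++ [file]) := by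
  by_cases h : d.contains k = false
  · simp only [h, if_true, PySem.Dict.modify, PySem.Dict.getD_insert_self,
      PySem.Dict.insert_insert_self, List.nil_append,
      PySem.Dict.getD_of_not_contains d ([] : List String) h]
  · simp [h]

theorem no_of_objs_spec_aux (data_dict : List (String × List Int)) (data_split : List String) :
    no_of_objs data_dict data_split = no_of_objs_alt data_dict data_split := by
  unfold no_of_objs no_of_objs_alt
  have hfold : data_split.foldl (fun d file =>
      let k : Int := pvKeyLen data_dict file
      if d.contains k = false then
        (d.insert k ([] : List String)).modify k [] (fun l => l ++ [file])
      else
        d.modify k [] (fun l => l ++ [file])) PySem.Dict.empty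
      = data_split.foldl (fun d file =>
          d.modify (pvKeyLen data_dict file) [] (fun l => l ++ [file])) PySem.Dict.empty := by
    apply PySem.List.foldl_congr_mem
    intro d file _
    exact pv_step_eq d (pvKeyLen data_dict file) file
  rw [hfold]
  set D := data_split.foldl (fun d file =>
      d.modify (pvKeyLen data_dict file) [] (fun l => l ++ [file])) PySem.Dict.empty with hD
  have hnd : D.keys.Nodup := by
    rw [hD]
    exact PySem.Dict.nodup_keys_foldl_modify_key data_split (pvKeyLen data_dict) []
      (fun _ file => fun l => l ++ [file]) PySem.Dict.empty (by simp [pysem])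
  have hkeys : D.keys = PySem.List.dedup (data_split.map (pvKeyLen data_dict)) := by
    rw [hD, PySem.Dict.keys_foldl_modify_key]
    simp [pysem, PySem.Set.update, PySem.Set.ofList]
  have hget : ∀ c : Int, D.getD c [] = data_split.filter (fun f => pvKeyLen data_dict f == c) := by
    intro c
    have hm : D = (data_split.map (fun f => (pvKeyLen data_dict f, f))).foldl
        (fun d p => d.modify p.1 [] (fun l => l ++ [p.2])) PySem.Dict.empty := by
      rw [hD, List.foldl_map]
    rw [hm, PySem.Dict.getD_foldl_modify_append]
    simp [List.filter_map, Function.comp_def]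
  rw [PySem.Dict.items_eq_map_keys D hnd [], hkeys]
  exact List.map_congr_left (fun c _ => by rw [hget c])

-- ===== VERDICT (by name: the statement is the Claim_ definition above) =====
theorem no_of_objs_spec : Claim_equal_no_of_objs := by
  intro data_dict data_split _ _
  exact no_of_objs_spec_aux data_dict data_split
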